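-- pv_equiv track=rewrite | github.com/yujinii59/AlgorithmPractice | 백준/Silver/2870. 수학숙제/수학숙제.py | solution
-- ===== SOURCE A (Python) =====
-- def solution(seq):
--     nums = []
--     temp = []
--     for s in seq:
--         if s.isalpha():
--             if len(temp) > 0:
--                 nums.append(int(''.join(temp)))
--                 temp = []
--         else:
--             temp.append(s)
--     if len(temp) > 0:
--         nums.append(int(''.join(temp)))
--
--     return nums
-- ===== SOURCE B (Python) =====
-- def solution(seq):
--     nums = []
--     i, n = 0, len(seq)
--     while i < n:
--         if seq[i].isalpha():
--             i += 1
--         else: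
--             j = i + 1
--             while j < n and not seq[j].isalpha():
--                 j += 1
--             nums.append(int(seq[i:j]))
--             i = j
--     return nums
-- ===== Notes on version B (the rewrite author's own statement) =====
-- stated objective: alternative
-- what changed: A streams characters through a temp buffer that it flushes into nums at each letter; B scans by spans, cutting each maximal non-letter run out whole with an inner scan and converting it directly, with no buffer or flush logic.
import Mathlib
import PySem

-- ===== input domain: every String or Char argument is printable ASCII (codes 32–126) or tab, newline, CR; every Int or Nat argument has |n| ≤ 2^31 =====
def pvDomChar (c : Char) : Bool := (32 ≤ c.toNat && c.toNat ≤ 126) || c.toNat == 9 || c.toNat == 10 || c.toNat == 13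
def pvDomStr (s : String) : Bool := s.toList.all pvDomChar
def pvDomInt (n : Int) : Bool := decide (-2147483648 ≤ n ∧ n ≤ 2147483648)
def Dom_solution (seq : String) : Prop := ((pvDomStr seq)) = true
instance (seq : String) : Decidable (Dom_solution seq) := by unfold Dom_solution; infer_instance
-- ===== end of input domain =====

-- B replaces A's temp-buffer-and-flush accumulator loop by a span scan that cuts each
-- maximal non-alpha run out whole (alternative decomposition, same O(n) cost);
-- both raise ValueError on runs int() rejects, which Pre_ excludes.

-- ===== PORT A =====
-- A's loop body: flush temp into nums at an alpha char, else push the char onto temp.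
def pvStepA (st : List Int × List Char) (c : Char) : List Int × List Char :=
  if PySem.Chars.isalpha c then
    if st.2.length > 0 then (st.1 ++ [(PySem.Int.ofChars? st.2).getD 0], ([] : List Char))
    else st
  else (st.1, st.2 ++ [c])

-- int(''.join(temp)) = PySem.Int.ofChars? temp; Pre_ guarantees it is `some`, `.getD 0` never fires inside Pre_.
def solution (seq : String) : List Int :=
  let r := seq.toList.foldl pvStepA (([] : List Int), ([] : List Char))
  if r.2.length > 0 then r.1 ++ [(PySem.Int.ofChars? r.2).getD 0] else r.1

-- ===== PORT B =====
-- Source B's outer while: skip an alpha char, else the inner while finds the end j of the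
-- current non-alpha run (= takeWhile/dropWhile on the rest) and int(seq[i:j]) is appended.
-- structural fuel (fuel = length of the list, a totality guard only; the 0 case is unreachable)
def pvGoBF : Nat → List Char → List Int
  | _, [] => []
  | 0, _ => []
  | fuel + 1, c :: cs =>
    if PySem.Chars.isalpha c then pvGoBF fuel cs
    else (PySem.Int.ofChars? (c :: cs.takeWhile (fun d => !PySem.Chars.isalpha d))).getD 0
           :: pvGoBF fuel (cs.dropWhile (fun d => !PySem.Chars.isalpha d))

def pvGoB (cs : List Char) : List Int := pvGoBF cs.length cs

def solution_alt (seq : String) : List Int := pvGoB seq.toList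

-- ===== PRECONDITION & SPEC =====
-- the maximal non-alpha runs of cs, in order (helper for Pre_ only; temp = current run)
def pvRuns : List Char → List Char → List (List Char)
  | temp, [] => if temp.length > 0 then [temp] else []
  | temp, c :: cs =>
    if PySem.Chars.isalpha c then
      if temp.length > 0 then temp :: pvRuns [] cs else pvRuns [] cs
    else pvRuns (temp ++ [c]) cs

def pvRunsNA (cs : List Char) : List (List Char) := pvRuns [] cs

-- Pre_ excludes exactly the inputs where Python A raises ValueError: some maximal
-- non-alpha run is not a valid int() literal (e.g. "1.5", "a--b", "x y").
def Pre_solution (seq : String) : Prop :=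
  ∀ r ∈ pvRunsNA seq.toList, (PySem.Int.ofChars? r).isSome = true
instance (seq : String) : Decidable (Pre_solution seq) := by unfold Pre_solution; infer_instance

def pvWitness_solution : String := "ab12cd 3ef+45"

def Spec_solution (seq : String) (out : List Int) : Prop := out = solution_alt seq
instance (seq : String) (out : List Int) : Decidable (Spec_solution seq out) := by unfold Spec_solution; infer_instance

-- ===== CLAIM (what is proved, stated in full; the proofs are below) =====
def Claim_equal_solution : Prop := ∀ (seq : String), Dom_solution seq → Pre_solution seq → Spec_solution seq (solution seq)

-- ===== LEMMAS AND PROOFS =====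
-- A's fold, rephrased with the pending temp buffer as an explicit argument
def pvGoA : List Char → List Char → List Int
  | temp, [] => if temp.length > 0 then [(PySem.Int.ofChars? temp).getD 0] else []
  | temp, c :: cs =>
    if PySem.Chars.isalpha c then
      if temp.length > 0 then (PySem.Int.ofChars? temp).getD 0 :: pvGoA [] cs else pvGoA [] cs
    else pvGoA (temp ++ [c]) cs

lemma pvFoldA_eq (cs : List Char) (nums : List Int) (temp : List Char) :
    (let r := cs.foldl pvStepA (nums, temp);
     if r.2.length > 0 then r.1 ++ [(PySem.Int.ofChars? r.2).getD 0] else r.1)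
    = nums ++ pvGoA temp cs := by
  induction cs generalizing nums temp with
  | nil => simp [pvGoA]; split_ifs <;> simp
  | cons c cs ih =>
    by_cases hc : PySem.Chars.isalpha c = true
    · by_cases ht : temp.length > 0
      · simp [List.foldl_cons, pvStepA, pvGoA, hc, ht, ih]
      · have he : temp = [] := by simpa using ht
        subst he
        simp [List.foldl_cons, pvStepA, pvGoA, hc, ih]
    · simp [List.foldl_cons, pvStepA, pvGoA, hc, ih]

lemma pvGoBF_congr (n : Nat) : ∀ (cs : List Char) (fuel fuel' : Nat), cs.length ≤ n →
    cs.length ≤ fuel → cs.length ≤ fuel' → pvGoBF fuel cs = pvGoBF fuel' cs := by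
  induction n with
  | zero =>
    intro cs fuel fuel' hn _ _
    have : cs = [] := by cases cs <;> simp_all
    subst this; cases fuel <;> cases fuel' <;> simp [pvGoBF]
  | succ n ih =>
    intro cs fuel fuel' hn hf hf'
    cases cs with
    | nil => cases fuel <;> cases fuel' <;> simp [pvGoBF]
    | cons c cs =>
      cases fuel with
      | zero => simp at hf
      | succ fuel =>
        cases fuel' with
        | zero => simp at hf'
        | succ fuel' =>
          simp only [pvGoBF]
          by_cases hc : PySem.Chars.isalpha c = true
          · simp only [hc, if_true]
            exact ih cs fuel fuel' (by simp at hn; omega) (by simp at hf; omega) (by simp at hf'; omega)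
          · have hd := List.length_dropWhile_le (fun d => !PySem.Chars.isalpha d) cs
            simp only [hc, Bool.false_eq_true, if_false]
            rw [ih (cs.dropWhile (fun d => !PySem.Chars.isalpha d)) fuel fuel'
                  (by simp at hn; omega) (by simp at hf; omega) (by simp at hf'; omega)]

@[simp] lemma pvGoB_nil : pvGoB [] = [] := rfl

lemma pvGoB_cons (c : Char) (cs : List Char) :
    pvGoB (c :: cs)
      = if PySem.Chars.isalpha c then pvGoB cs
        else (PySem.Int.ofChars? (c :: cs.takeWhile (fun d => !PySem.Chars.isalpha d))).getD 0
               :: pvGoB (cs.dropWhile (fun d => !PySem.Chars.isalpha d)) := by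
  have hd := List.length_dropWhile_le (fun d => !PySem.Chars.isalpha d) cs
  unfold pvGoB
  simp only [List.length_cons, pvGoBF]
  by_cases hc : PySem.Chars.isalpha c = true
  · simp [hc]
  · simp only [hc, Bool.false_eq_true, if_false]
    rw [pvGoBF_congr cs.length (cs.dropWhile (fun d => !PySem.Chars.isalpha d)) cs.length
          (cs.dropWhile (fun d => !PySem.Chars.isalpha d)).length hd hd le_rfl]

lemma pvGoA_goB (cs : List Char) :
    pvGoA [] cs = pvGoB cs ∧
    ∀ temp, temp ≠ [] →
      pvGoA temp cs
        = (PySem.Int.ofChars? (temp ++ cs.takeWhile (fun d => !PySem.Chars.isalpha d))).getD 0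
            :: pvGoB (cs.dropWhile (fun d => !PySem.Chars.isalpha d)) := by
  induction cs with
  | nil =>
    refine ⟨by simp [pvGoA], ?_⟩
    intro temp h
    simp [pvGoA, List.length_pos_iff, h]
  | cons c cs ih =>
    by_cases hc : PySem.Chars.isalpha c = true
    · refine ⟨?_, ?_⟩
      · simp [pvGoA, pvGoB_cons, hc, ih.1]
      · intro temp h
        simp [pvGoA, pvGoB_cons, hc, List.length_pos_iff, h, ih.1]
    · refine ⟨?_, ?_⟩
      · have h2 := ih.2 [c] (by simp)
        rw [pvGoB_cons]
        simp [pvGoA, hc, h2]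
      · intro temp h
        have h2 := ih.2 (temp ++ [c]) (by simp)
        simp [pvGoA, hc, h2]

-- ===== VERDICT (by name: the statement is the Claim_ definition above) =====
theorem solution_spec : Claim_equal_solution := by
  intro seq _ _
  unfold Spec_solution solution solution_alt
  have h := pvFoldA_eq seq.toList [] []
  simp only [h, List.nil_append, (pvGoA_goB seq.toList).1]
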